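-- pv_equiv track=rewrite | github.com/kaluginpeter/Algorithms_and_structures_tasks | CodeWars/6kyu/Simple_Fun_332_Catch_Thief.py | catch_thief
-- ===== SOURCE A (Python) =====
-- def catch_thief(queue):
--     line_sweep: list[int] = [0] * len(queue)
--     for i in range(len(queue)):
--         if not queue[i].isdigit(): continue
--         line_sweep[max(0, i - int(queue[i]))] += 1
--         if i + int(queue[i]) + 1 < len(queue):
--             line_sweep[i + int(queue[i]) + 1] -= 1
--     output: int = 0
--     cnt: int = 0
--     for i in range(len(queue)):
--         cnt += line_sweep[i]
--         if queue[i] == 'X' and cnt: output += 1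
--     return output
-- ===== SOURCE B (Python) =====
-- def catch_thief(queue):
--     guards = [j for j in range(len(queue)) if queue[j].isdigit()]
--     count = 0
--     for i in range(len(queue)):
--         if queue[i] == 'X' and any(abs(i - j) <= int(queue[j]) for j in guards):
--             count += 1
--     return count
-- ===== Notes on version B (the rewrite author's own statement) =====
-- stated objective: simpler
-- what changed: Replaced the difference-array (line sweep + prefix-sum) construction by a direct per-thief scan: collect guard positions once, then for each 'X' test abs(i-j) <= int(queue[j]) against the guards.
import Mathlib
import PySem

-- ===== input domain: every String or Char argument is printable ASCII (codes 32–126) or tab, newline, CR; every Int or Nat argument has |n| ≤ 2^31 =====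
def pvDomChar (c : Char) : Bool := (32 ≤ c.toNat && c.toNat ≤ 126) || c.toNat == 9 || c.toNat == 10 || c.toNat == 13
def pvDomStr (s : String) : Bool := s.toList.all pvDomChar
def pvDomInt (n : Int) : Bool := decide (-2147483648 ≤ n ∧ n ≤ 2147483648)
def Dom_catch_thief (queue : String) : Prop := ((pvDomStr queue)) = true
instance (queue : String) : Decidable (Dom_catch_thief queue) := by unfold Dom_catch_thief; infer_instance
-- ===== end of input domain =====

-- B replaces A's difference-array + prefix-sum sweep by a direct per-thief scan over the
-- guard positions (objective: simpler).

-- ===== PORT A =====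
-- one pass of A's first loop: the two difference-array updates for position i
-- (max(0, i - d) is Nat subtraction i - d; int(queue[i]) of a digit char is c.toNat - 48, exact)
def pvSweepStep (l : List Char) (n : Nat) (ls : List Int) (i : Nat) : List Int :=
  let c := l.getD i ' '
  if PySem.Chars.isdigit c then
    let d : Nat := c.toNat - 48
    let ls1 := ls.set (i - d) (ls.getD (i - d) 0 + 1)
    if i + d + 1 < n then ls1.set (i + d + 1) (ls1.getD (i + d + 1) 0 - 1) else ls1
  else ls

-- one pass of A's second loop over state (output, cnt)
def pvCountStep (l : List Char) (ls : List Int) (p : Int × Int) (i : Nat) : Int × Int :=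
  let cnt := p.2 + ls.getD i 0
  (if l.getD i ' ' == 'X' && cnt != 0 then p.1 + 1 else p.1, cnt)

def catch_thief (queue : String) : Int :=
  let l := queue.toList
  let n := l.length
  let lineSweep := (List.range n).foldl (pvSweepStep l n) (List.replicate n (0 : Int))
  ((List.range n).foldl (pvCountStep l lineSweep) (0, 0)).1

-- ===== PORT B =====
-- abs(i - j) <= int(queue[j])  (int of a digit char is c.toNat - 48, exact on digits)
def pvCover (l : List Char) (i j : Nat) : Bool :=
  decide ((((i : Int) - (j : Int)).natAbs : Int) ≤ ((l.getD j ' ').toNat : Int) - 48)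

def catch_thief_alt (queue : String) : Int :=
  let l := queue.toList
  let n := l.length
  let guards := (List.range n).filter (fun j => PySem.Chars.isdigit (l.getD j ' '))
  (List.range n).foldl (fun count i =>
    if l.getD i ' ' == 'X' && guards.any (pvCover l i) then count + 1 else count) 0

-- ===== PRECONDITION & SPEC =====
def Spec_catch_thief (queue : String) (out : Int) : Prop := out = catch_thief_alt queue
instance (queue : String) (out : Int) : Decidable (Spec_catch_thief queue out) := by unfold Spec_catch_thief; infer_instance

-- ===== CLAIM (what is proved, stated in full; the proofs are below) =====
def Claim_equal_catch_thief : Prop := ∀ (queue : String), Dom_catch_thief queue → Spec_catch_thief queue (catch_thief queue)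

-- ===== LEMMAS AND PROOFS =====

-- prefix sum of A's difference array, read at index i
def pvPs (arr : List Int) (i : Nat) : Int := (arr.take (i + 1)).sum

-- contribution of loop index j of A's first loop to the prefix sum at i
def pvContrib (l : List Char) (n : Nat) (j i : Nat) : Int :=
  if PySem.Chars.isdigit (l.getD j ' ') then
    (if j - ((l.getD j ' ').toNat - 48) ≤ i then (1 : Int) else 0) +
    (if j + ((l.getD j ' ').toNat - 48) + 1 < n ∧ j + ((l.getD j ' ').toNat - 48) + 1 ≤ i then (-1 : Int) else 0)
  else 0

theorem pv_isdigit_bounds (c : Char) (h : PySem.Chars.isdigit c = true) :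
    48 ≤ c.toNat ∧ c.toNat ≤ 57 := by
  revert h
  simp only [PySem.Chars.isdigit, Bool.and_eq_true, decide_eq_true_eq, Char.le_def,
    UInt32.le_iff_toNat_le, Char.toNat]
  intro h
  exact ⟨h.1, h.2⟩

theorem pvSweepStep_length (l : List Char) (n : Nat) (ls : List Int) (i : Nat) :
    (pvSweepStep l n ls i).length = ls.length := by
  unfold pvSweepStep
  dsimp only
  split_ifs <;> simp

theorem pvPs_cons_zero (a : Int) (as : List Int) : pvPs (a :: as) 0 = a := by
  simp [pvPs]

theorem pvPs_cons_succ (a : Int) (as : List Int) (i : Nat) :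
    pvPs (a :: as) (i + 1) = a + pvPs as i := by
  simp [pvPs, List.take_succ_cons]

theorem pvPs_set (arr : List Int) (k : Nat) (hk : k < arr.length) (v : Int) (i : Nat) :
    pvPs (arr.set k (arr.getD k 0 + v)) i = pvPs arr i + if k ≤ i then v else 0 := by
  induction arr generalizing k i with
  | nil => simp at hk
  | cons a as ih =>
    cases k with
    | zero =>
      cases i with
      | zero => simp [pvPs_cons_zero]
      | succ i => simp [pvPs_cons_succ]; ring
    | succ k =>
      have hk' : k < as.length := by simpa using hk
      cases i with
      | zero => simp [pvPs_cons_zero]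
      | succ i =>
        simp only [List.set_cons_succ, List.getD_cons_succ, pvPs_cons_succ,
          ih k hk' (i := i), Nat.succ_le_succ_iff]
        split_ifs <;> ring

theorem pvPs_sweepStep (l : List Char) (n : Nat) (ls : List Int) (j i : Nat)
    (hlen : ls.length = n) (hj : j < n) :
    pvPs (pvSweepStep l n ls j) i = pvPs ls i + pvContrib l n j i := by
  unfold pvSweepStep pvContrib
  by_cases hd : PySem.Chars.isdigit (l.getD j ' ') = true
  · simp only [hd, if_true]
    have h1 : j - ((l.getD j ' ').toNat - 48) < ls.length := by omega
    by_cases h2 : j + ((l.getD j ' ').toNat - 48) + 1 < n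
    · have h2' : j + ((l.getD j ' ').toNat - 48) + 1
          < (ls.set (j - ((l.getD j ' ').toNat - 48))
              (ls.getD (j - ((l.getD j ' ').toNat - 48)) 0 + 1)).length := by
        rw [List.length_set]; omega
      have e : ∀ (xs : List Int) (k : Nat), xs.getD k 0 - 1 = xs.getD k 0 + (-1) := by
        intro xs k; ring
      rw [if_pos h2, e, pvPs_set _ _ h2' (-1), pvPs_set _ _ h1 1]
      simp only [h2, true_and]
      ring
    · rw [if_neg h2, pvPs_set _ _ h1 1]
      simp only [h2, false_and, if_false]
      ring
  · rw [if_neg hd, if_neg hd]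
    ring

theorem pvSweep_ps (l : List Char) (n : Nat) (js : List Nat) (ls : List Int)
    (hlen : ls.length = n) (hjs : ∀ j ∈ js, j < n) (i : Nat) :
    pvPs (js.foldl (pvSweepStep l n) ls) i
      = pvPs ls i + (js.map (fun j => pvContrib l n j i)).sum := by
  induction js generalizing ls with
  | nil => simp
  | cons j js ih =>
    have hj : j < n := hjs j (by simp)
    have hlen' : (pvSweepStep l n ls j).length = n := by rw [pvSweepStep_length, hlen]
    simp only [List.foldl_cons, List.map_cons, List.sum_cons,
      ih (pvSweepStep l n ls j) hlen' (fun x hx => hjs x (by simp [hx])),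
      pvPs_sweepStep l n ls j i hlen hj]
    ring

theorem pvContrib_cover (l : List Char) (n : Nat) (j i : Nat) (hi : i < n) :
    pvContrib l n j i
      = if (PySem.Chars.isdigit (l.getD j ' ') && pvCover l i j) = true then (1 : Int) else 0 := by
  by_cases hd : PySem.Chars.isdigit (l.getD j ' ') = true
  · have h48 := (pv_isdigit_bounds _ hd).1
    simp only [pvContrib, pvCover, hd, if_true, Bool.true_and, decide_eq_true_eq]
    split_ifs <;> omega
  · unfold pvContrib
    rw [Bool.not_eq_true] at hd
    rw [hd]
    simp

theorem pvPs_take_succ (ls : List Int) (m : Nat) :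
    (ls.take (m + 1)).sum = (ls.take m).sum + ls.getD m 0 := by
  by_cases h : m < ls.length
  · rw [List.take_add_one, List.sum_append, List.getD_eq_getElem?_getD,
      List.getElem?_eq_getElem h]
    simp
  · have h' : ls.length ≤ m := by omega
    rw [List.take_of_length_le h', List.take_of_length_le (Nat.le_succ_of_le h')]
    simp [List.getD_eq_getElem?_getD, List.getElem?_eq_none h']

theorem pvCount_loop (l : List Char) (ls : List Int) (m : Nat) :
    (List.range m).foldl (pvCountStep l ls) (0, 0)
      = (((List.range m).countP (fun i => l.getD i ' ' == 'X' && decide (pvPs ls i ≠ 0)) : Int),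
         (ls.take m).sum) := by
  induction m with
  | zero => simp
  | succ m ih =>
    rw [List.range_succ, List.foldl_append, ih, List.countP_append]
    have hcnt : (ls.take m).sum + ls.getD m 0 = pvPs ls m := by
      rw [pvPs, pvPs_take_succ]
    simp only [List.foldl_cons, List.foldl_nil, pvCountStep, hcnt,
      List.countP_cons, List.countP_nil, Prod.mk.injEq]
    have hb : (l.getD m ' ' == 'X' && pvPs ls m != 0)
        = (l.getD m ' ' == 'X' && decide (pvPs ls m ≠ 0)) := by
      by_cases h0 : pvPs ls m = 0 <;> simp [bne, h0]
    refine ⟨?_, rfl⟩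
    rw [hb]
    push_cast
    split_ifs <;> ring

theorem catch_thief_eq (queue : String) : catch_thief queue = catch_thief_alt queue := by
  simp only [catch_thief, catch_thief_alt]
  set l := queue.toList with hl
  set n := l.length with hn
  set lineSweep := (List.range n).foldl (pvSweepStep l n) (List.replicate n (0 : Int)) with hls
  rw [PySem.List.foldl_count_if, pvCount_loop]
  simp only [zero_add]
  congr 1
  apply List.countP_congr
  intro i hi
  have hin : i < n := List.mem_range.mp hi
  -- prefix sum at i equals the number of guards covering i
  have hps : pvPs lineSweep i
      = (((List.range n).countP
            (fun j => PySem.Chars.isdigit (l.getD j ' ') && pvCover l i j) : Nat) : Int) := by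
    rw [hls, pvSweep_ps l n _ _ (by simp) (fun j hj => List.mem_range.mp hj) i]
    have hz : pvPs (List.replicate n (0 : Int)) i = 0 := by
      simp [pvPs, List.take_replicate]
    rw [hz, zero_add]
    have hmap : (List.range n).map (fun j => pvContrib l n j i)
        = (List.range n).map (fun j =>
            if (PySem.Chars.isdigit (l.getD j ' ') && pvCover l i j) = true then (1 : Int) else 0) :=
      List.map_congr_left (fun j _ => pvContrib_cover l n j i hin)
    rw [hmap, PySem.List.sum_map_ite_one_zero]
  have hany : decide (pvPs lineSweep i ≠ 0)
      = ((List.range n).filter (fun j => PySem.Chars.isdigit (l.getD j ' '))).any (pvCover l i) := by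
    rw [List.any_filter, hps]
    rcases Nat.eq_zero_or_pos ((List.range n).countP
        (fun j => PySem.Chars.isdigit (l.getD j ' ') && pvCover l i j)) with h0 | h0
    · rw [h0, List.any_eq_false.mpr (List.countP_eq_zero.mp h0)]
      simp
    · rw [List.any_eq_true.mpr (List.countP_pos_iff.mp h0)]
      exact decide_eq_true (Int.natCast_ne_zero.mpr (Nat.pos_iff_ne_zero.mp h0))
  rw [hany]

-- ===== VERDICT (by name: the statement is the Claim_ definition above) =====
theorem catch_thief_spec : Claim_equal_catch_thief := by
  intro queue _
  exact catch_thief_eq queue
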